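-- pv_equiv track=rewrite | github.com/devops-adeel/gtd-coach | gtd_coach/agent/tools/gtd.py | _estimate_time
-- ===== SOURCE A (Python) =====
-- def _estimate_time(content: str) -> int:
--     """Estimate time in minutes for action"""
--     content_lower = content.lower()
--
--     # Quick tasks
--     if any(word in content_lower for word in ['quick', 'simple', 'just']):
--         return 5
--     # Communication tasks
--     elif any(word in content_lower for word in ['email', 'call', 'message']):
--         return 10
--     # Review tasks
--     elif any(word in content_lower for word in ['review', 'read', 'check']):
--         return 20
--     # Complex tasks
--     elif any(word in content_lower for word in ['create', 'write', 'develop', 'analyze']):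
--         return 45
--     else:
--         return 15  # Default
-- ===== SOURCE B (Python) =====
-- _KEYWORDS = {
--     'quick': (0, 5), 'simple': (0, 5), 'just': (0, 5),
--     'email': (1, 10), 'call': (1, 10), 'message': (1, 10),
--     'review': (2, 20), 'read': (2, 20), 'check': (2, 20),
--     'create': (3, 45), 'write': (3, 45), 'develop': (3, 45), 'analyze': (3, 45),
-- }
--
--
-- def _estimate_time(content: str) -> int:
--     """Estimate time in minutes for action"""
--     low = content.lower()
--     return min((pm for w, pm in _KEYWORDS.items() if w in low),
--                default=(4, 15))[1]
-- ===== Notes on version B (the rewrite author's own statement) =====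
-- stated objective: alternative
-- what changed: Instead of a priority-ordered if/elif chain with early return, B flattens the groups into a keyword->(priority, minutes) map, collects ALL matching keywords, and aggregates with min over (priority, minutes) pairs (default (4, 15)); the branch order is replaced by a numeric priority and a min-reduction.
import Mathlib
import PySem

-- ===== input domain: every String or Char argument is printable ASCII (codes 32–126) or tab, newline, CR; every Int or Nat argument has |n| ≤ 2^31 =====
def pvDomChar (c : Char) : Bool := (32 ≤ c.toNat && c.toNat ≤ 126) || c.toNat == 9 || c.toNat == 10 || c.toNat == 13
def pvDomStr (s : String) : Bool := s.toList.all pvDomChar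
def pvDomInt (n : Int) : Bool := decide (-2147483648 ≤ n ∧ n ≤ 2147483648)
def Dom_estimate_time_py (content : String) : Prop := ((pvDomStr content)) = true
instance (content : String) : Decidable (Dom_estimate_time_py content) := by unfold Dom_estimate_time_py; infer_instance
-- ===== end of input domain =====

-- B replaces the priority if/elif chain by a flat keyword -> (priority, minutes) map and a min-reduction over all matches.


-- ===== PORT A =====
def estimate_time_py (content : String) : Int :=
  let content_lower := PySem.Str.lower content
  if ["quick", "simple", "just"].any (fun word => PySem.Str.isIn word content_lower) then 5
  else if ["email", "call", "message"].any (fun word => PySem.Str.isIn word content_lower) then 10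
  else if ["review", "read", "check"].any (fun word => PySem.Str.isIn word content_lower) then 20
  else if ["create", "write", "develop", "analyze"].any (fun word => PySem.Str.isIn word content_lower) then 45
  else 15

-- ===== PORT B =====
-- the flat keyword -> (priority, minutes) map of Source B, in insertion order
def pvKeywords : List (String × Int × Int) :=
  [("quick", 0, 5), ("simple", 0, 5), ("just", 0, 5),
   ("email", 1, 10), ("call", 1, 10), ("message", 1, 10),
   ("review", 2, 20), ("read", 2, 20), ("check", 2, 20),
   ("create", 3, 45), ("write", 3, 45), ("develop", 3, 45), ("analyze", 3, 45)]

-- Python's min over tuples: lexicographic, first minimal kept on ties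
def pvMinPair (a b : Int × Int) : Int × Int :=
  if b.1 < a.1 ∨ (b.1 = a.1 ∧ b.2 < a.2) then b else a

-- min((pm for w, pm in _KEYWORDS.items() if w in low), default=(4, 15))
def pvMinMatch (low : String) : Int × Int :=
  match pvKeywords.filterMap
      (fun wpm => if PySem.Str.isIn wpm.1 low then some wpm.2 else none) with
  | [] => (4, 15)
  | x :: xs => xs.foldl pvMinPair x

def estimate_time_py_alt (content : String) : Int :=
  (pvMinMatch (PySem.Str.lower content)).2

-- ===== PRECONDITION & SPEC =====
def Spec_estimate_time_py (content : String) (out : Int) : Prop := out = estimate_time_py_alt content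
instance (content : String) (out : Int) : Decidable (Spec_estimate_time_py content out) := by unfold Spec_estimate_time_py; infer_instance

-- ===== CLAIM (what is proved, stated in full; the proofs are below) =====
def Claim_equal_estimate_time_py : Prop := ∀ (content : String), Dom_estimate_time_py content → Spec_estimate_time_py content (estimate_time_py content)

-- ===== LEMMAS AND PROOFS =====

-- proof helper: the filterMap of the port, with the membership tests abstracted to booleans
def pvCat : List (Bool × Int × Int) → List (Int × Int)
  | [] => []
  | (b, p) :: r => if b then p :: pvCat r else pvCat r

theorem pvCat_filterMap (p : String × Int × Int → Bool) (l : List (String × Int × Int)) :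
    l.filterMap (fun wpm => if p wpm then some wpm.2 else none)
      = pvCat (l.map (fun wpm => (p wpm, wpm.2))) := by
  induction l with
  | nil => rfl
  | cons h t ih =>
    cases hb : p h <;> simp [pvCat, hb, ih]

-- the whole equivalence as a statement about 13 booleans
theorem pvBoolCase : ∀ b1 b2 b3 b4 b5 b6 b7 b8 b9 b10 b11 b12 b13 : Bool,
    (if (b1 || (b2 || b3)) = true then (5 : Int)
     else if (b4 || (b5 || b6)) = true then 10
     else if (b7 || (b8 || b9)) = true then 20
     else if (b10 || (b11 || (b12 || b13))) = true then 45
     else 15)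
      = (match pvCat [(b1, 0, 5), (b2, 0, 5), (b3, 0, 5),
          (b4, 1, 10), (b5, 1, 10), (b6, 1, 10),
          (b7, 2, 20), (b8, 2, 20), (b9, 2, 20),
          (b10, 3, 45), (b11, 3, 45), (b12, 3, 45), (b13, 3, 45)] with
         | [] => ((4 : Int), (15 : Int))
         | x :: xs => xs.foldl pvMinPair x).2 := by
  decide

-- ===== VERDICT (by name: the statement is the Claim_ definition above) =====
theorem estimate_time_py_spec : Claim_equal_estimate_time_py := by
  intro content _
  show estimate_time_py content = estimate_time_py_alt content
  simp only [estimate_time_py, estimate_time_py_alt, pvMinMatch, pvKeywords,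
    pvCat_filterMap, List.map_cons, List.map_nil, List.any_cons, List.any_nil,
    Bool.or_false]
  exact pvBoolCase _ _ _ _ _ _ _ _ _ _ _ _ _
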